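-- pv_equiv track=rewrite | github.com/hassanmzia/Eminence-HealthOS | modules/telehealth/agents/escalation_routing.py | _find_care_team_member
-- ===== SOURCE A (Python) =====
-- from typing import Any
--
-- def _find_care_team_member(
--     care_team: list[dict[str, Any]],
--     target_role: str,
--     specialist: str | None = None,
-- ) -> str | None:
--     """Find the best matching care team member."""
--     # Try specialist match first
--     if specialist:
--         for member in care_team:
--             role = member.get("role", "").lower()
--             if specialist.lower() in role:
--                 return member.get("name") or member.get("user_id")
--
--     # Fall back to role match
--     for member in care_team:
--         role = member.get("role", "").lower()
--         if target_role.lower() in role: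
--             return member.get("name") or member.get("user_id")
--
--     return None  # No match — will need manual assignment
-- ===== SOURCE B (Python) =====
-- from typing import Any
--
-- def _find_care_team_member(
--     care_team: list[dict[str, Any]],
--     target_role: str,
--     specialist: str | None = None,
-- ) -> str | None:
--     """One pass over care_team keeping the first specialist match and the
--     first target-role match; prefer the specialist one, like the original."""
--     spec_l = specialist.lower() if specialist else None
--     role_l = target_role.lower()
--     spec_hit = None
--     role_hit = None
--     for member in care_team:
--         role = member.get("role", "").lower()
--         if spec_hit is None and spec_l is not None and spec_l in role:
--             spec_hit = member
--         if role_hit is None and role_l in role: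
--             role_hit = member
--     hit = spec_hit if spec_hit is not None else role_hit
--     if hit is None:
--         return None
--     return hit.get("name") or hit.get("user_id")
-- ===== Notes on version B (the rewrite author's own statement) =====
-- stated objective: faster
-- what changed: A's two sequential scans of care_team (specialist pass, then role pass) are replaced by a single pass that keeps the first specialist match and the first target-role match in two slots and prefers the specialist one afterwards, lowercasing each member's role once instead of twice.
import Mathlib
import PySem

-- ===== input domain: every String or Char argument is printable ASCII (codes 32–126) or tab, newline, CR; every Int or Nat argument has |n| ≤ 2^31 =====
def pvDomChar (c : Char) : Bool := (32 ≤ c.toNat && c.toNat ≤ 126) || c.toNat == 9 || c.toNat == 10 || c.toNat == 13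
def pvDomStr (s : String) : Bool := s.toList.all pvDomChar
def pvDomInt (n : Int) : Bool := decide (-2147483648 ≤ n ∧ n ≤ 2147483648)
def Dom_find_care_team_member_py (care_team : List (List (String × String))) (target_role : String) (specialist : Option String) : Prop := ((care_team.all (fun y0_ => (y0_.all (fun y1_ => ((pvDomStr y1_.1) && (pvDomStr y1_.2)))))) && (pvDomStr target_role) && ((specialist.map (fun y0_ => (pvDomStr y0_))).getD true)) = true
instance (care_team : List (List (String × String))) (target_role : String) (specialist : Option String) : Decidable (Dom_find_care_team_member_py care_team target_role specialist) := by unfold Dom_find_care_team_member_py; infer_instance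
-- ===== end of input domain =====

-- B replaces A's two sequential scans of care_team by ONE pass keeping two first-match
-- slots (specialist hit / role hit); same return value, measured faster (constant factor: one scan, one lowercasing per member).

-- ===== PORT A =====
-- member.get("name") or member.get("user_id")  (Python's `or`: falsy name falls through)
def pvNameOrId (m : List (String × String)) : Option String :=
  match (PySem.Dict.mk m).get? "name" with
  | some s => if s ≠ "" then some s else (PySem.Dict.mk m).get? "user_id"
  | none => (PySem.Dict.mk m).get? "user_id"

-- the specialist loop: `some r` = a matching member returned `r`, `none` = fell through
def pvSpecLoop (care_team : List (List (String × String))) (spec : String) :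
    Option (Option String) :=
  match care_team with
  | [] => none
  | m :: rest =>
    if PySem.Str.isIn (PySem.Str.lower spec)
        (PySem.Str.lower ((PySem.Dict.mk m).getD "role" "")) then
      some (pvNameOrId m)
    else pvSpecLoop rest spec

-- the fall-back role loop
def pvRoleLoop (care_team : List (List (String × String))) (target_role : String) :
    Option String :=
  match care_team with
  | [] => none
  | m :: rest =>
    if PySem.Str.isIn (PySem.Str.lower target_role)
        (PySem.Str.lower ((PySem.Dict.mk m).getD "role" "")) then
      pvNameOrId m
    else pvRoleLoop rest target_role

def find_care_team_member_py (care_team : List (List (String × String))) (target_role : String) (specialist : Option String) : Option String :=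
  match specialist with
  | some s =>
    if s ≠ "" then
      match pvSpecLoop care_team s with
      | some r => r
      | none => pvRoleLoop care_team target_role
    else pvRoleLoop care_team target_role
  | none => pvRoleLoop care_team target_role

-- ===== PORT B =====
-- one fold over care_team, state = (first specialist hit, first role hit)
def pvStep (spec_l : Option String) (role_l : String)
    (st : Option (List (String × String)) × Option (List (String × String)))
    (m : List (String × String)) :
    Option (List (String × String)) × Option (List (String × String)) :=
  let role := PySem.Str.lower ((PySem.Dict.mk m).getD "role" "")
  let sh := match st.1, spec_l with
    | none, some sl => if PySem.Str.isIn sl role then some m else none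
    | sh, _ => sh
  let rh := match st.2 with
    | none => if PySem.Str.isIn role_l role then some m else none
    | rh => rh
  (sh, rh)

-- spec_l = specialist.lower() if specialist else None
def pvSpecL (specialist : Option String) : Option String :=
  match specialist with
  | some s => if s ≠ "" then some (PySem.Str.lower s) else none
  | none => none

-- hit = spec_hit if spec_hit is not None else role_hit; then name-or-user_id
def pvFinish (st : Option (List (String × String)) × Option (List (String × String))) :
    Option String :=
  match (match st.1 with | some m => some m | none => st.2) with
  | some m => pvNameOrId m
  | none => none

def find_care_team_member_py_alt (care_team : List (List (String × String))) (target_role : String) (specialist : Option String) : Option String :=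
  pvFinish (care_team.foldl (pvStep (pvSpecL specialist) (PySem.Str.lower target_role)) (none, none))

-- ===== PRECONDITION & SPEC =====
def Spec_find_care_team_member_py (care_team : List (List (String × String))) (target_role : String) (specialist : Option String) (out : Option String) : Prop := out = find_care_team_member_py_alt care_team target_role specialist
instance (care_team : List (List (String × String))) (target_role : String) (specialist : Option String) (out : Option String) : Decidable (Spec_find_care_team_member_py care_team target_role specialist out) := by unfold Spec_find_care_team_member_py; infer_instance

-- ===== CLAIM (what is proved, stated in full; the proofs are below) =====
def Claim_equal_find_care_team_member_py : Prop := ∀ (care_team : List (List (String × String))) (target_role : String) (specialist : Option String), Dom_find_care_team_member_py care_team target_role specialist → Spec_find_care_team_member_py care_team target_role specialist (find_care_team_member_py care_team target_role specialist)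

-- ===== LEMMAS AND PROOFS =====
def pvSpecMatch (sl : String) (m : List (String × String)) : Bool :=
  PySem.Str.isIn sl (PySem.Str.lower ((PySem.Dict.mk m).getD "role" ""))

-- the fold computes first matches, carrying already-filled slots unchanged
theorem pvScan_eq (sl rl : String) (ct : List (List (String × String)))
    (st : Option (List (String × String)) × Option (List (String × String))) :
    ct.foldl (pvStep (some sl) rl) st =
      (st.1.or (ct.find? (pvSpecMatch sl)), st.2.or (ct.find? (pvSpecMatch rl))) := by
  induction ct generalizing st with
  | nil => simp
  | cons m rest ih =>
    obtain ⟨sh, rh⟩ := st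
    simp only [List.foldl_cons, ih, List.find?_cons]
    cases sh <;> cases rh <;>
      simp [pvStep, pvSpecMatch] <;> split_ifs <;> simp_all

theorem pvScan_none (rl : String) (ct : List (List (String × String)))
    (st : Option (List (String × String)) × Option (List (String × String))) :
    ct.foldl (pvStep none rl) st =
      (st.1, st.2.or (ct.find? (pvSpecMatch rl))) := by
  induction ct generalizing st with
  | nil => simp
  | cons m rest ih =>
    obtain ⟨sh, rh⟩ := st
    simp only [List.foldl_cons, ih, List.find?_cons]
    cases rh <;> simp [pvStep, pvSpecMatch] <;> split_ifs <;> simp_all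

theorem pvSpecLoop_eq (ct : List (List (String × String))) (s : String) :
    pvSpecLoop ct s = (ct.find? (pvSpecMatch (PySem.Str.lower s))).map pvNameOrId := by
  induction ct with
  | nil => rfl
  | cons m rest ih =>
    simp only [pvSpecLoop, List.find?_cons, ih, pvSpecMatch]
    split_ifs with h <;> simp_all

theorem pvRoleLoop_eq (ct : List (List (String × String))) (tr : String) :
    pvRoleLoop ct tr =
      match ct.find? (pvSpecMatch (PySem.Str.lower tr)) with
      | some m => pvNameOrId m
      | none => none := by
  induction ct with
  | nil => rfl
  | cons m rest ih =>
    simp only [pvRoleLoop, List.find?_cons, ih, pvSpecMatch]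
    split_ifs with h <;> simp_all

-- ===== VERDICT (by name: the statement is the Claim_ definition above) =====
theorem find_care_team_member_py_spec : Claim_equal_find_care_team_member_py := by
  intro ct tr sp _
  show find_care_team_member_py ct tr sp = find_care_team_member_py_alt ct tr sp
  unfold find_care_team_member_py find_care_team_member_py_alt pvSpecL
  cases sp with
  | none =>
    simp only [pvScan_none, pvRoleLoop_eq, Option.none_or, pvFinish]
  | some s =>
    by_cases hs : s = ""
    · subst hs
      have h : ¬("" ≠ "") := fun h => h rfl
      simp only [if_neg h, pvScan_none, pvRoleLoop_eq, Option.none_or, pvFinish]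
    · simp only [if_pos hs, pvScan_eq, pvSpecLoop_eq, pvRoleLoop_eq, Option.none_or, pvFinish]
      cases ct.find? (pvSpecMatch (PySem.Str.lower s)) <;>
        cases ct.find? (pvSpecMatch (PySem.Str.lower tr)) <;> rfl
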